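-- pv_equiv track=rewrite | github.com/seyen37/stroke-order | src/stroke_order/exporters/wordart.py | _cycle_chars
-- ===== SOURCE A (Python) =====
-- def _cycle_chars(chars: list, target: int) -> list:
--     """Repeat ``chars`` (by reference) until the list has exactly ``target``
--     elements. Empty input or non-positive target returns an empty list."""
--     if not chars or target <= 0:
--         return []
--     if len(chars) >= target:
--         return chars[:target]
--     out: list = []
--     i = 0
--     n = len(chars)
--     while len(out) < target:
--         out.append(chars[i % n])
--         i += 1
--     return out
-- ===== SOURCE B (Python) =====
-- def _cycle_chars(chars: list, target: int) -> list:
--     """Repeat ``chars`` (by reference) until the list has exactly ``target``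
--     elements. Empty input or non-positive target returns an empty list."""
--     if not chars or target <= 0:
--         return []
--     reps = target // len(chars) + 1
--     return (chars * reps)[:target]
-- ===== Notes on version B (the rewrite author's own statement) =====
-- stated objective: simpler
-- what changed: Replaced the per-element while loop (append chars[i % n] until target length) with one arithmetic repetition count reps = target//n + 1, a single list multiplication and a slice; the len >= target branch collapses into the same expression.
import Mathlib
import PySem

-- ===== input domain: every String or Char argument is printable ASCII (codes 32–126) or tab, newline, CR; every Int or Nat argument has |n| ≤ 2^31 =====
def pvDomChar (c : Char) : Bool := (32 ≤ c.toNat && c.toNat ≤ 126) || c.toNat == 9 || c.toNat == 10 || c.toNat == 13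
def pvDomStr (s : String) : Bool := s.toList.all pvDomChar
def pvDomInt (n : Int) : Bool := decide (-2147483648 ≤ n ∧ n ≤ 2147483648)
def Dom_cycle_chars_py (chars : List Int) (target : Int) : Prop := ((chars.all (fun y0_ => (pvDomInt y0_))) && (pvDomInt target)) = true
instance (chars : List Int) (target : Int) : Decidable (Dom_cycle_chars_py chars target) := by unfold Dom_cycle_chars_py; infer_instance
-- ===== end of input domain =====

-- B replaces A's per-element while loop by one arithmetic repetition count, one list
-- multiplication and a slice (objective: simpler; same asymptotic cost).

-- ===== PORT A =====
-- the while loop; fuel = remaining iterations (the loop adds one element per pass, so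
-- target.toNat fuel is exact); the index i % n is always in range, so pyGetD's default is dead
def cycleLoopA (chars : List Int) (target : Int) (out : List Int) (i : Int) (fuel : Nat) : List Int :=
  if (out.length : Int) < target then
    match fuel with
    | 0 => out
    | f+1 => cycleLoopA chars target
        (out ++ [PySem.List.pyGetD chars (PySem.Int.mod i (chars.length : Int)) 0]) (i+1) f
  else out
termination_by fuel

def cycle_chars_py (chars : List Int) (target : Int) : List Int :=
  if chars = [] ∨ target ≤ 0 then []
  else if (chars.length : Int) ≥ target then PySem.List.slice chars none (some target)
  else cycleLoopA chars target [] 0 target.toNat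

-- ===== PORT B =====
def cycle_chars_py_alt (chars : List Int) (target : Int) : List Int :=
  if chars = [] ∨ target ≤ 0 then []
  else
    let reps := PySem.Int.floordiv target (chars.length : Int) + 1
    PySem.List.slice (List.replicate reps.toNat chars).flatten none (some target)

-- ===== PRECONDITION & SPEC =====
def Spec_cycle_chars_py (chars : List Int) (target : Int) (out : List Int) : Prop := out = cycle_chars_py_alt chars target
instance (chars : List Int) (target : Int) (out : List Int) : Decidable (Spec_cycle_chars_py chars target out) := by unfold Spec_cycle_chars_py; infer_instance

-- ===== CLAIM (what is proved, stated in full; the proofs are below) =====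
def Claim_equal_cycle_chars_py : Prop := ∀ (chars : List Int) (target : Int), Dom_cycle_chars_py chars target → Spec_cycle_chars_py chars target (cycle_chars_py chars target)

-- ===== LEMMAS AND PROOFS =====

lemma flat_len (chars : List Int) (m : Nat) :
    ((List.replicate m chars).flatten).length = m * chars.length := by
  simp [List.length_flatten, List.map_replicate, List.sum_replicate, smul_eq_mul]

lemma flat_getD (chars : List Int) (m j : Nat) (hj : j < m * chars.length) :
    ((List.replicate m chars).flatten).getD j 0 = chars.getD (j % chars.length) 0 := by
  induction m generalizing j with
  | zero => simp at hj
  | succ m ih =>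
    rcases Nat.eq_zero_or_pos chars.length with h0 | hn
    · simp [h0] at hj
    rw [Nat.succ_mul] at hj
    rw [List.replicate_succ, List.flatten_cons]
    by_cases hlt : j < chars.length
    · rw [List.getD_append _ _ _ _ hlt, Nat.mod_eq_of_lt hlt]
    · have hle : chars.length ≤ j := by omega
      rw [List.getD_append_right _ _ _ _ hle, ih (j - chars.length) (by omega),
        Nat.mod_eq_sub_mod hle]

lemma loopA_eq (chars : List Int) (target : Int) :
    ∀ (fuel : Nat) (out : List Int) (i : Nat),
      ((out.length : Int) + (fuel : Int) = target) →
      cycleLoopA chars target out (i : Int) fuel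
        = out ++ (List.range fuel).map (fun k => chars.getD ((i + k) % chars.length) 0) := by
  intro fuel
  induction fuel with
  | zero =>
    intro out i h
    unfold cycleLoopA
    have : ¬ ((out.length : Int) < target) := by omega
    simp [this]
  | succ f ih =>
    intro out i h
    unfold cycleLoopA
    have hc : ((out.length : Int) < target) := by push_cast at h; omega
    rw [if_pos hc]
    have he : PySem.List.pyGetD chars (PySem.Int.mod (i : Int) (chars.length : Int)) 0
        = chars.getD (i % chars.length) 0 := by
      rw [PySem.Int.mod_natCast, PySem.List.pyGetD_natCast]
    have hi1 : ((i : Int) + 1) = ((i + 1 : Nat) : Int) := by push_cast; ring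
    rw [he, hi1]
    show cycleLoopA chars target (out ++ [chars.getD (i % chars.length) 0]) ((i + 1 : Nat) : Int) f
        = out ++ (List.range (f+1)).map (fun k => chars.getD ((i + k) % chars.length) 0)
    rw [ih (out ++ [chars.getD (i % chars.length) 0]) (i + 1)
      (by simp; push_cast at h ⊢; omega)]
    rw [List.append_assoc]
    congr 1
    rw [List.range_succ_eq_map, List.map_cons, List.map_map]
    simp only [List.singleton_append, Nat.add_zero]
    congr 1
    · apply List.map_congr_left
      intro k _
      simp only [Function.comp]
      congr 2
      omega

-- ===== VERDICT (by name: the statement is the Claim_ definition above) =====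
theorem cycle_chars_py_spec : Claim_equal_cycle_chars_py := by
  unfold Claim_equal_cycle_chars_py Spec_cycle_chars_py
  intro chars target _
  unfold cycle_chars_py cycle_chars_py_alt
  by_cases h0 : chars = [] ∨ target ≤ 0
  · simp [h0]
  rw [if_neg h0, if_neg h0]
  push_neg at h0
  obtain ⟨hne, htpos⟩ := h0
  have hn : 0 < chars.length := List.length_pos_iff.mpr hne
  set n : Nat := chars.length with hnd
  -- arithmetic about reps
  set q : Int := PySem.Int.floordiv target (n : Int) with hq
  have hqe : q = target / (n : Int) := by
    rw [hq, PySem.Int.floordiv_eq_ediv_of_pos (by exact_mod_cast hn)]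
  have hq0 : 0 ≤ q := by
    rw [hqe]; exact Int.ediv_nonneg (by omega) (by exact_mod_cast Nat.zero_le n)
  have hub : target < (q + 1) * (n : Int) := by
    rw [hqe]; exact Int.lt_ediv_add_one_mul_self target (by exact_mod_cast hn)
  have hr : (q + 1).toNat = q.toNat + 1 := by omega
  have hcap : target.toNat ≤ (q + 1).toNat * n := by
    have : ((q + 1).toNat : Int) * (n : Int) = (q + 1) * (n : Int) := by
      congr 1; omega
    have h2 : (target.toNat : Int) < ((q + 1).toNat * n : Nat) := by push_cast at this ⊢; omega
    exact_mod_cast Int.le_of_lt h2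
  -- B's value is a take of the flattened replication
  have hB : PySem.List.slice (List.replicate (q + 1).toNat chars).flatten none (some target)
      = (List.replicate (q + 1).toNat chars).flatten.take target.toNat :=
    PySem.List.slice_to _ (by omega)
  rw [hB]
  by_cases hbig : (chars.length : Int) ≥ target
  · -- A returns chars[:target]; target ≤ n so the slice of the flat list is the same prefix
    rw [if_pos hbig, PySem.List.slice_to _ (by omega)]
    have htn : target.toNat ≤ n := by omega
    rw [hr, List.replicate_succ, List.flatten_cons,
      List.take_append_of_le_length (by omega)]
  · rw [if_neg hbig]
    have hfuel : ((([] : List Int)).length : Int) + (target.toNat : Int) = target := by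
      simp; omega
    have hloop := loopA_eq chars target target.toNat [] 0 hfuel
    simp only [Nat.cast_zero] at hloop
    rw [hloop, List.nil_append]
    -- both sides element-by-element
    apply List.ext_getElem
    · rw [List.length_take, List.length_map, List.length_range, flat_len]
      have hcap' : target.toNat ≤ (q + 1).toNat * chars.length := hnd ▸ hcap
      omega
    · intro k h1 h2
      have hk : k < target.toNat := by simpa using h1
      have hkflat : k < (q + 1).toNat * n := by omega
      simp only [List.getElem_map, List.getElem_range, List.getElem_take]
      have hleft := flat_getD chars (q + 1).toNat k hkflat
      have hlen : k < ((List.replicate (q + 1).toNat chars).flatten).length := by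
        rw [flat_len]; omega
      calc chars.getD ((0 + k) % n) 0
          = chars.getD (k % n) 0 := by rw [Nat.zero_add]
        _ = (List.replicate (q + 1).toNat chars).flatten.getD k 0 := hleft.symm
        _ = (List.replicate (q + 1).toNat chars).flatten[k] := List.getD_eq_getElem _ _ hlen
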